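-- pv_equiv track=rewrite | github.com/Diego-Roque/Algoritmos | codeforces/lastyears_substring.py | can_transform_to_2020
-- ===== SOURCE A (Python) =====
-- def can_transform_to_2020(s):
--
--     if s == "2020":
--         return True
--
--     n = len(s)
--
--
--     if "2020" in s:
--         return True
--
--
--     for i in range(n):
--         for j in range(i, n):
--
--             new_s = s[:i] + s[j+1:]
--
--             if new_s == "2020":
--                 return True
--
--
--             if "2020" in new_s:
--                 return True
--
--     return False
-- ===== SOURCE B (Python) =====
-- def can_transform_to_2020(s):
--     t = "2020"
--     for k in range(5):
--         i = s.find(t[:k])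
--         j = s.rfind(t[k:])
--         if i != -1 and j != -1 and i + k <= j:
--             return True
--     return False
-- ===== Notes on version B (the rewrite author's own statement) =====
-- stated objective: faster
-- what changed: Replaces A's O(n^3) enumeration of all (i,j) deletions (each with an O(n) substring test) by five O(n) scans: for each split point k of the four-character target pattern it takes the leftmost occurrence of the pattern's k-prefix (find) and the rightmost occurrence of its k-suffix (rfind) and checks they fit around a deletable gap.
import Mathlib
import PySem

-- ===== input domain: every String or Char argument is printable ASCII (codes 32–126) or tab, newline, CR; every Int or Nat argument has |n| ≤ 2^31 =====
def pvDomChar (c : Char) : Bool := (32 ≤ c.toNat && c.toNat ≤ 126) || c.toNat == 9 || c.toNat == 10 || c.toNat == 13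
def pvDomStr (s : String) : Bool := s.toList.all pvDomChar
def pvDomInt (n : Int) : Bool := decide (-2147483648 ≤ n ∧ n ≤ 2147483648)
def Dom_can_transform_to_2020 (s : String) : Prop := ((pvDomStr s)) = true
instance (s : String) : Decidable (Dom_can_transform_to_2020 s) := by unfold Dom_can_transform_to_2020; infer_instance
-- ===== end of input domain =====

-- B replaces A's cubic scan over all deletions by five find/rfind scans: deleting a substring
-- leaves the target pattern iff some k-prefix / k-suffix split of it occurs left of / right of a junction.

-- ===== PORT A =====
def can_transform_to_2020 (s : String) : Bool :=
  if s == "2020" then true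
  else
    let n : Int := (s.toList.length : Int)
    if PySem.Chars.isIn "2020".toList s.toList then true
    else
      (PySem.List.pyRange 0 n).any (fun i =>
        (PySem.List.pyRange i n).any (fun j =>
          let new_s := PySem.List.slice s.toList none (some i) ++
                       PySem.List.slice s.toList (some (j + 1)) none
          if new_s = "2020".toList then true
          else if PySem.Chars.isIn "2020".toList new_s then true
          else false))

-- ===== PORT B =====
def can_transform_to_2020_alt (s : String) : Bool :=
  let t := "2020".toList
  (PySem.List.pyRange 0 5).any (fun k =>
    let i := PySem.Chars.find s.toList (PySem.List.slice t none (some k))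
    let j := PySem.Chars.rfind s.toList (PySem.List.slice t (some k) none)
    i != -1 && j != -1 && decide (i + k ≤ j))

-- ===== PRECONDITION & SPEC =====
def Spec_can_transform_to_2020 (s : String) (out : Bool) : Prop := out = can_transform_to_2020_alt s
instance (s : String) (out : Bool) : Decidable (Spec_can_transform_to_2020 s out) := by unfold Spec_can_transform_to_2020; infer_instance

-- ===== CLAIM (what is proved, stated in full; the proofs are below) =====
def Claim_equal_can_transform_to_2020 : Prop := ∀ (s : String), Dom_can_transform_to_2020 s → Spec_can_transform_to_2020 s (can_transform_to_2020 s)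

-- ===== LEMMAS AND PROOFS =====

-- the pattern, as a list of chars
def pvT : List Char := ['2', '0', '2', '0']

lemma pvT_eq : "2020".toList = pvT := rfl

-- the common specification: some split of the pattern occurs as prefix-at-p / prefix-at-q with p+k ≤ q
def pvP (l : List Char) : Prop :=
  ∃ k p q : Nat, k ≤ 4 ∧ p + k ≤ q ∧ pvT.take k <+: l.drop p ∧ pvT.drop k <+: l.drop q

-- infix ↔ occurrence at some drop position
lemma pv_infix_iff (a l : List Char) : a <:+: l ↔ ∃ p : Nat, a <+: l.drop p := by
  rw [← PySem.Chars.isIn_iff_infix, ← PySem.Chars.exists_prefix_drop_iff_isIn]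

-- containment gives pvP (take k = 4)
lemma pv_contained_P {l : List Char} (h : pvT <:+: l) : pvP l := by
  obtain ⟨p, hp⟩ := (pv_infix_iff pvT l).mp h
  exact ⟨4, p, p + 4, le_refl _, le_refl _, by simpa [pvT] using hp, by simp [pvT]⟩

-- glue two adjacent occurrences
lemma pv_glue {l x y : List Char} {p : Nat} (h1 : x <+: l.drop p)
    (h2 : y <+: l.drop (p + x.length)) : x ++ y <+: l.drop p := by
  obtain ⟨w, hw⟩ := h1
  have hdw : l.drop (p + x.length) = w := by
    have h1' : l.drop (p + x.length) = (l.drop p).drop x.length := by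
      rw [List.drop_drop]
      try congr 1
      try omega
    rw [h1', ← hw, List.drop_left]
  rw [hdw] at h2
  obtain ⟨w2, hw2⟩ := h2
  exact ⟨w2, by rw [List.append_assoc, hw2, hw]⟩

-- prefix of an append, wholly inside the left part
lemma pv_prefix_append_left {t a b : List Char} (h : t <+: a ++ b) (hl : t.length ≤ a.length) :
    t <+: a := by
  have := List.prefix_iff_eq_take.mp h
  rw [List.take_append_of_le_length hl] at this
  rw [this]
  exact List.take_prefix _ _

-- prefix of an append, crossing: first |a| chars equal a, rest prefix of b
lemma pv_prefix_append_cross {t a b : List Char} (h : t <+: a ++ b) (hl : a.length ≤ t.length) :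
    t.take a.length = a ∧ t.drop a.length <+: b := by
  obtain ⟨w, hw⟩ := h
  have hta : t.take a.length = a := by
    have : (t ++ w).take a.length = (a ++ b).take a.length := by rw [hw]
    rwa [List.take_append_of_le_length hl, List.take_append_of_le_length (le_refl _),
      List.take_length] at this
  constructor
  · exact hta
  · have hsplit : t = a ++ t.drop a.length := by
      conv_lhs => rw [← List.take_append_drop a.length t, hta]
    rw [hsplit, List.append_assoc] at hw
    have : t.drop a.length ++ w = b := List.append_cancel_left hw
    exact ⟨w, this⟩

-- occurrence inside a (take i ++ drop (j+1)) deletion string gives pvP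
lemma pv_del_P {l : List Char} {i j r : Nat} (hij : i ≤ j) (hj : j < l.length)
    (h : pvT <+: (l.take i ++ l.drop (j + 1)).drop r) : pvP l := by
  have hi : (l.take i).length = i := by rw [List.length_take]; omega
  rw [List.drop_append, hi] at h
  by_cases hri : i ≤ r
  · -- wholly in the right part
    have : (l.take i).drop r = [] := List.drop_eq_nil_of_le (by omega)
    rw [this, List.nil_append, List.drop_drop] at h
    exact pv_contained_P ((pv_infix_iff _ _).mpr ⟨_, h⟩)
  · rw [Nat.not_le] at hri
    rw [show r - i = 0 by omega, List.drop_zero] at h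
    set k := i - r with hk
    have hdt : (l.take i).drop r = (l.drop r).take k := by
      rw [List.drop_take]
    rw [hdt] at h
    have hlen : ((l.drop r).take k).length = k := by
      rw [List.length_take, List.length_drop]; omega
    by_cases hk4 : 4 ≤ k
    · -- pattern wholly in the left part: contained in l
      have h4 : pvT.length ≤ ((l.drop r).take k).length := by rw [hlen]; simp [pvT]; omega
      have := pv_prefix_append_left h h4
      have : pvT <+: l.drop r := this.trans (List.take_prefix _ _)
      exact pv_contained_P ((pv_infix_iff _ _).mpr ⟨_, this⟩)
    · rw [Nat.not_le] at hk4
      have hlen' : ((l.drop r).take k).length ≤ pvT.length := by rw [hlen]; simp [pvT]; omega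
      obtain ⟨h1, h2⟩ := pv_prefix_append_cross h hlen'
      rw [hlen] at h1 h2
      refine ⟨k, r, j + 1, by omega, by omega, ?_, h2⟩
      rw [h1]; exact List.take_prefix _ _

-- pvP gives containment or a successful deletion
lemma pv_P_del {l : List Char} (h : pvP l) :
    pvT <:+: l ∨ ∃ i j : Nat, i ≤ j ∧ j < l.length ∧ pvT <:+: (l.take i ++ l.drop (j + 1)) := by
  obtain ⟨k, p, q, hk, hpq, hpre, hsuf⟩ := h
  by_cases hk0 : k = 0
  · subst hk0
    left
    exact (pv_infix_iff _ _).mpr ⟨q, by simpa using hsuf⟩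
  by_cases hk4 : k = 4
  · subst hk4
    left
    exact (pv_infix_iff _ _).mpr ⟨p, by simpa [pvT] using hpre⟩
  -- 1 ≤ k ≤ 3 : both parts nonempty
  have hk13 : 1 ≤ k ∧ k ≤ 3 := by omega
  have hprelen : (pvT.take k).length = k := by rw [List.length_take]; simp [pvT]; omega
  have hsuflen : (pvT.drop k).length = 4 - k := by rw [List.length_drop]; simp [pvT]
  have hple : p + k ≤ l.length := by
    have := hpre.length_le
    rw [hprelen, List.length_drop] at this
    by_cases hpl : p ≤ l.length
    · omega
    · exfalso
      have : l.drop p = [] := List.drop_eq_nil_of_le (by omega)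
      rw [this, List.prefix_nil] at hpre
      have := congrArg List.length hpre
      rw [hprelen] at this
      simp at this; omega
  have hqle : q + (4 - k) ≤ l.length := by
    have := hsuf.length_le
    rw [hsuflen, List.length_drop] at this
    by_cases hql : q ≤ l.length
    · omega
    · exfalso
      have : l.drop q = [] := List.drop_eq_nil_of_le (by omega)
      rw [this, List.prefix_nil] at hsuf
      have := congrArg List.length hsuf
      rw [hsuflen] at this
      simp at this; omega
  by_cases heq : p + k = q
  · -- zero gap: the pattern itself occurs in l
    left
    have h2 : pvT.drop k <+: l.drop (p + (pvT.take k).length) := by rw [hprelen, heq]; exact hsuf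
    have := pv_glue hpre h2
    rw [List.take_append_drop] at this
    exact (pv_infix_iff _ _).mpr ⟨p, this⟩
  · right
    refine ⟨p + k, q - 1, by omega, by omega, ?_⟩
    have hq1 : q - 1 + 1 = q := by omega
    rw [hq1]
    -- pvT.take k is a suffix of l.take (p+k), pvT.drop k a prefix of l.drop q
    have hpre' : pvT.take k = (l.drop p).take k := by
      have := List.prefix_iff_eq_take.mp hpre
      rwa [hprelen] at this
    have hsplit : l.take (p + k) = l.take p ++ (l.drop p).take k := List.take_add
    have hsufx : pvT.take k <:+ l.take (p + k) := by
      rw [hsplit, hpre']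
      exact ⟨l.take p, rfl⟩
    -- combine suffix-of-left and prefix-of-right into infix of append
    obtain ⟨w1, hw1⟩ := hsufx
    obtain ⟨w2, hw2⟩ := hsuf
    refine ⟨w1, w2, ?_⟩
    rw [← hw1, ← hw2]
    simp only [List.append_assoc]
    congr 1
    rw [← List.append_assoc, List.take_append_drop]
-- characterisation of port A
lemma pv_A_iff (s : String) :
    can_transform_to_2020 s = true ↔
      (pvT <:+: s.toList ∨ ∃ i j : Nat, i ≤ j ∧ j < s.toList.length ∧
        pvT <:+: (s.toList.take i ++ s.toList.drop (j + 1))) := by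
  unfold can_transform_to_2020
  by_cases h2020 : s == "2020"
  · simp only [h2020, if_true, true_iff]
    left
    have : s = "2020" := by exact_mod_cast (beq_iff_eq.mp h2020)
    rw [this, pvT_eq]
  · rw [if_neg (by simpa using h2020)]
    by_cases hin : PySem.Chars.isIn "2020".toList s.toList = true
    · simp only [hin, if_true, true_iff]
      left
      rw [← pvT_eq]
      exact (PySem.Chars.isIn_iff_infix _ _).mp hin
    · rw [if_neg hin]
      have hnotin : ¬ pvT <:+: s.toList := by
        rw [← pvT_eq]
        exact fun hc => hin ((PySem.Chars.isIn_iff_infix _ _).mpr hc)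
      simp only [List.any_eq_true, PySem.List.mem_pyRange_one]
      constructor
      · rintro ⟨i, ⟨hi0, hin'⟩, j, ⟨hij, hjn⟩, hcond⟩
        right
        refine ⟨i.toNat, j.toNat, by omega, by omega, ?_⟩
        have hsl1 : PySem.List.slice s.toList none (some i) = s.toList.take i.toNat :=
          PySem.List.slice_to _ hi0
        have hsl2 : PySem.List.slice s.toList (some (j + 1)) none = s.toList.drop (j + 1).toNat :=
          PySem.List.slice_from _ (by omega)
        have hj1 : (j + 1).toNat = j.toNat + 1 := by omega
        rw [hsl1, hsl2, hj1] at hcond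
        by_cases he : s.toList.take i.toNat ++ s.toList.drop (j.toNat + 1) = "2020".toList
        · rw [← pvT_eq, ← he]
        · rw [if_neg he] at hcond
          by_cases hc : PySem.Chars.isIn "2020".toList
              (s.toList.take i.toNat ++ s.toList.drop (j.toNat + 1)) = true
          · rw [← pvT_eq]
            exact (PySem.Chars.isIn_iff_infix _ _).mp hc
          · rw [if_neg hc] at hcond
            exact absurd hcond (by simp)
      · rintro (hc | ⟨i, j, hij, hjn, hocc⟩)
        · exact absurd hc hnotin
        · refine ⟨(i : Int), ⟨by omega, by omega⟩, (j : Int), ⟨by omega, by omega⟩, ?_⟩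
          have hsl1 : PySem.List.slice s.toList none (some (i : Int)) = s.toList.take i :=
            by rw [PySem.List.slice_to _ (by omega)]; norm_num
          have hsl2 : PySem.List.slice s.toList (some ((j : Int) + 1)) none = s.toList.drop (j + 1) :=
            by rw [PySem.List.slice_from _ (by omega)]; norm_num
          rw [hsl1, hsl2]
          rw [← pvT_eq] at hocc
          split_ifs with he hc
          · rfl
          · rfl
          · exact absurd ((PySem.Chars.isIn_iff_infix _ _).mpr hocc) hc

-- the full description of rfind's backwards scan
lemma pv_rfind_go_cases (s sub : List Char) (x : Nat) :
    (PySem.Chars.rfind.go s sub x = -1 ∧ ∀ i ≤ x, ¬ sub <+: s.drop i) ∨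
    (∃ m : Nat, PySem.Chars.rfind.go s sub x = (m : Int) ∧ m ≤ x ∧ sub <+: s.drop m ∧
      ∀ i, m < i → i ≤ x → ¬ sub <+: s.drop i) := by
  induction x with
  | zero =>
    by_cases h : sub.isPrefixOf s
    · right
      exact ⟨0, by simp [PySem.Chars.rfind.go, h], le_refl _,
        by simpa using List.isPrefixOf_iff_prefix.mp h,
        fun i h1 h2 => absurd (by omega : (0:Nat) < 0) (by omega)⟩
    · left
      refine ⟨by simp [PySem.Chars.rfind.go, h], ?_⟩
      intro i hi
      interval_cases i
      simpa using fun hc => h (List.isPrefixOf_iff_prefix.mpr hc)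
  | succ x ih =>
    by_cases h : sub.isPrefixOf (s.drop (x + 1))
    · right
      exact ⟨x + 1, by simp [PySem.Chars.rfind.go, h], le_refl _,
        List.isPrefixOf_iff_prefix.mp h,
        fun i h1 h2 => absurd h1 (by omega)⟩
    · have hgo : PySem.Chars.rfind.go s sub (x + 1) = PySem.Chars.rfind.go s sub x := by
        simp [PySem.Chars.rfind.go, h]
      have hx1 : ¬ sub <+: s.drop (x + 1) := fun hc => h (List.isPrefixOf_iff_prefix.mpr hc)
      rcases ih with ⟨he, hall⟩ | ⟨m, he, hm, hocc, hmax⟩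
      · left
        refine ⟨by rw [hgo, he], fun i hi => ?_⟩
        rcases Nat.lt_or_ge i (x + 1) with hlt | hge
        · exact hall i (by omega)
        · have : i = x + 1 := by omega
          rw [this]; exact hx1
      · right
        refine ⟨m, by rw [hgo, he], by omega, hocc, fun i h1 h2 => ?_⟩
        rcases Nat.lt_or_ge i (x + 1) with hlt | hge
        · exact hmax i h1 (by omega)
        · have : i = x + 1 := by omega
          rw [this]; exact hx1

lemma pv_rfind_cases (l sub : List Char) :
    (PySem.Chars.rfind l sub = -1 ∧ ∀ i : Nat, ¬ sub <+: l.drop i) ∨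
    (∃ m : Nat, PySem.Chars.rfind l sub = (m : Int) ∧ m ≤ l.length ∧ sub <+: l.drop m ∧
      ∀ i, m < i → i ≤ l.length → ¬ sub <+: l.drop i) := by
  rcases pv_rfind_go_cases l sub l.length with ⟨he, hall⟩ | hr
  · left
    refine ⟨he, fun i hc => ?_⟩
    rcases Nat.lt_or_ge l.length i with hlt | hle
    · have h1 : l.drop i = [] := List.drop_eq_nil_of_le (by omega)
      have h2 : l.drop l.length = [] := List.drop_eq_nil_of_le (le_refl _)
      exact hall l.length (le_refl _) (by rw [h2, ← h1]; exact hc)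
    · exact hall i hle hc
  · right; exact hr

-- the per-k condition of port B, characterised
lemma pv_B_cond_iff (l : List Char) (k : Int) (hk0 : 0 ≤ k) (hk4 : k ≤ 4) :
    ((PySem.Chars.find l (pvT.take k.toNat) != -1 &&
      PySem.Chars.rfind l (pvT.drop k.toNat) != -1 &&
      decide (PySem.Chars.find l (pvT.take k.toNat) + k ≤ PySem.Chars.rfind l (pvT.drop k.toNat))) = true)
    ↔ ∃ p q : Nat, p + k.toNat ≤ q ∧ pvT.take k.toNat <+: l.drop p ∧ pvT.drop k.toNat <+: l.drop q := by
  obtain ⟨κ, rfl⟩ : ∃ κ : Nat, k = (κ : Int) := ⟨k.toNat, by omega⟩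
  have hκ : κ ≤ 4 := by omega
  have hn : ((κ : Int)).toNat = κ := by omega
  rw [hn]
  simp only [Bool.and_eq_true, bne_iff_ne, ne_eq, decide_eq_true_eq]
  constructor
  · rintro ⟨⟨hf, hr⟩, hle⟩
    have hf0 : 0 ≤ PySem.Chars.find l (pvT.take κ) := by
      have := PySem.Chars.neg_one_le_find l (pvT.take κ)
      rcases lt_or_eq_of_le this with h | h
      · omega
      · exact absurd h.symm hf
    obtain ⟨hocc, _⟩ := PySem.Chars.find_spec hf0
    rcases pv_rfind_cases l (pvT.drop κ) with ⟨he, _⟩ | ⟨m, he, _, hoccr, _⟩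
    · exact absurd he hr
    · refine ⟨(PySem.Chars.find l (pvT.take κ)).toNat, m, ?_, hocc, hoccr⟩
      rw [he] at hle
      omega
  · rintro ⟨p, q, hpq, hpre, hsuf⟩
    -- find side
    have hinf : (pvT.take κ) <:+: l := by
      rcases Nat.lt_or_ge l.length p with hpl | hpl
      · have : l.drop p = [] := List.drop_eq_nil_of_le (by omega)
        rw [this, List.prefix_nil] at hpre
        rw [hpre]
        exact List.nil_infix
      · exact (pv_infix_iff _ _).mpr ⟨p, hpre⟩
    have hfne : PySem.Chars.find l (pvT.take κ) ≠ -1 := (PySem.Chars.find_ne_neg_one_iff _ _).mpr hinf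
    have hf0 : 0 ≤ PySem.Chars.find l (pvT.take κ) := by
      have := PySem.Chars.neg_one_le_find l (pvT.take κ)
      rcases lt_or_eq_of_le this with h | h
      · omega
      · exact absurd h.symm hfne
    obtain ⟨_, hmin⟩ := PySem.Chars.find_spec hf0
    have hfp : (PySem.Chars.find l (pvT.take κ)).toNat ≤ p := by
      by_contra hc
      exact hmin p (by omega) hpre
    -- rfind side: occurrence at min q l.length
    have hq' : pvT.drop κ <+: l.drop (min q l.length) := by
      rcases Nat.lt_or_ge l.length q with hql | hql
      · have hnil : l.drop q = [] := List.drop_eq_nil_of_le (by omega)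
        rw [hnil, List.prefix_nil] at hsuf
        rw [hsuf]
        exact List.nil_prefix
      · rwa [Nat.min_eq_left hql]
    rcases pv_rfind_cases l (pvT.drop κ) with ⟨_, hall⟩ | ⟨m, he, _, _, hmax⟩
    · exact absurd hq' (hall _)
    · have hq'm : min q l.length ≤ m := by
        by_contra hc
        exact hmax _ (by omega) (Nat.min_le_right _ _) hq'
      refine ⟨⟨hfne, by rw [he]; exact (by omega : (m : Int) ≠ -1)⟩, ?_⟩
      rw [he]
      rcases Nat.lt_or_ge l.length q with hql | hql
      swap
      · have : min q l.length = q := Nat.min_eq_left hql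
        omega
      · -- q beyond the string: the suffix part must be empty, so κ = 4
        have hnil : l.drop q = [] := List.drop_eq_nil_of_le (by omega)
        rw [hnil, List.prefix_nil] at hsuf
        have hκ4 : κ = 4 := by
          have := congrArg List.length hsuf
          rw [List.length_drop] at this
          simp [pvT] at this
          omega
        subst hκ4
        have hpre4 : pvT <+: l.drop p := by simpa [pvT] using hpre
        have hp4 : p + 4 ≤ l.length := by
          have h1 := hpre4.length_le
          rw [List.length_drop] at h1
          rcases Nat.lt_or_ge l.length p with h2 | h2
          swap
          · simp [pvT] at h1; omega
          · exfalso
            have : l.drop p = [] := List.drop_eq_nil_of_le (by omega)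
            rw [this, List.prefix_nil] at hpre4
            simp [pvT] at hpre4
        have hlm : min q l.length = l.length := Nat.min_eq_right (by omega)
        omega

-- characterisation of port B
lemma pv_B_iff (s : String) : can_transform_to_2020_alt s = true ↔ pvP s.toList := by
  unfold can_transform_to_2020_alt
  simp only [List.any_eq_true, PySem.List.mem_pyRange_one]
  constructor
  · rintro ⟨k, ⟨hk0, hk5⟩, hcond⟩
    have hsl1 : PySem.List.slice "2020".toList none (some k) = pvT.take k.toNat := by
      rw [PySem.List.slice_to _ hk0, pvT_eq]
    have hsl2 : PySem.List.slice "2020".toList (some k) none = pvT.drop k.toNat := by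
      rw [PySem.List.slice_from _ hk0, pvT_eq]
    rw [hsl1, hsl2] at hcond
    obtain ⟨p, q, h1, h2, h3⟩ := (pv_B_cond_iff s.toList k hk0 (by omega)).mp hcond
    exact ⟨k.toNat, p, q, by omega, h1, h2, h3⟩
  · rintro ⟨κ, p, q, hκ, h1, h2, h3⟩
    refine ⟨(κ : Int), ⟨by omega, by omega⟩, ?_⟩
    have hn : ((κ : Int)).toNat = κ := by omega
    have hsl1 : PySem.List.slice "2020".toList none (some (κ : Int)) = pvT.take ((κ : Int)).toNat := by
      rw [PySem.List.slice_to _ (by omega), pvT_eq]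
    have hsl2 : PySem.List.slice "2020".toList (some (κ : Int)) none = pvT.drop ((κ : Int)).toNat := by
      rw [PySem.List.slice_from _ (by omega), pvT_eq]
    rw [hsl1, hsl2]
    refine (pv_B_cond_iff s.toList (κ : Int) (by omega) (by omega)).mpr ?_
    rw [hn]
    exact ⟨p, q, h1, h2, h3⟩

-- A’s disjunction is equivalent to pvP
lemma pv_A_rhs_iff (l : List Char) :
    (pvT <:+: l ∨ ∃ i j : Nat, i ≤ j ∧ j < l.length ∧
      pvT <:+: (l.take i ++ l.drop (j + 1))) ↔ pvP l := by
  constructor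
  · rintro (hc | ⟨i, j, hij, hjn, hocc⟩)
    · exact pv_contained_P hc
    · obtain ⟨r, hr⟩ := (pv_infix_iff _ _).mp hocc
      exact pv_del_P hij hjn hr
  · exact pv_P_del

-- ===== VERDICT (by name: the statement is the Claim_ definition above) =====
theorem can_transform_to_2020_spec : Claim_equal_can_transform_to_2020 := by
  intro s _
  unfold Spec_can_transform_to_2020
  have hA := pv_A_iff s
  have hB := pv_B_iff s
  have hAB := (pv_A_rhs_iff s.toList)
  cases hA' : can_transform_to_2020 s <;> cases hB' : can_transform_to_2020_alt s
  · rfl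
  · rw [hA'] at hA
    rw [hB'] at hB
    exact absurd (hAB.mpr (hB.mp rfl)) (by simpa using hA)
  · rw [hA'] at hA
    rw [hB'] at hB
    exact absurd (hAB.mp (hA.mp rfl)) (by simpa using hB)
  · rfl
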